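-- pv_equiv track=rewrite | github.com/fkurmannucsc/cse239 | assignment1/wordcount.py | text_to_words
-- ===== SOURCE A (Python) =====
-- import string
-- import collections
--
-- def text_to_words(text_chunk):
--     """
--     Read a chunk of text and return a sequence of (word, occurances) values.
--     """
--     STOP_WORDS = set([
--     'a', 'an', 'and', 'are', 'as', 'be', 'by', 'for', 'if', 'in',
--     'is', 'it', 'of', 'or', 'py', 'rst', 'that', 'the', 'to', 'with',
--     ])
--     TR = "".maketrans(string.punctuation, ' ' * len(string.punctuation))
--
--     counts = collections.Counter()
--     # Count instances of each word for a text chunk. Combine results into a condensed dictionary in the sub-process already.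
--     for word in text_chunk.translate(TR).lower().split():
--         if word.isalpha() and word not in STOP_WORDS:
--             counts[word] += 1
--     return counts
-- ===== SOURCE B (Python) =====
-- import collections
--
-- def text_to_words(text_chunk):
--     """Single character-level scan: assemble alphabetic tokens by hand (no translate/split) and tally them in a dict."""
--     STOP_WORDS = {
--         'a', 'an', 'and', 'are', 'as', 'be', 'by', 'for', 'if', 'in',
--         'is', 'it', 'of', 'or', 'py', 'rst', 'that', 'the', 'to', 'with',
--     }
--     counts = {}
--     buf = []
--     alpha = True
--     for c in text_chunk + ' ':          # trailing sentinel flushes the last token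
--         if c.isalnum():
--             buf.append(c.lower())
--             alpha = alpha and c.isalpha()
--         else:
--             if buf and alpha:
--                 w = ''.join(buf)
--                 if w not in STOP_WORDS:
--                     counts[w] = counts.get(w, 0) + 1
--             buf = []
--             alpha = True
--     return collections.Counter(counts)
-- ===== Notes on version B (the rewrite author's own statement) =====
-- stated objective: alternative
-- what changed: A builds a translate table, lowercases and splits the whole text, then Counter-counts the filtered words; B never calls translate/split/Counter: it is a single character-level state machine that assembles each token by hand (buffer + all-alphabetic flag) and tallies it into a plain dict at every token boundary.
import Mathlib
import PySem

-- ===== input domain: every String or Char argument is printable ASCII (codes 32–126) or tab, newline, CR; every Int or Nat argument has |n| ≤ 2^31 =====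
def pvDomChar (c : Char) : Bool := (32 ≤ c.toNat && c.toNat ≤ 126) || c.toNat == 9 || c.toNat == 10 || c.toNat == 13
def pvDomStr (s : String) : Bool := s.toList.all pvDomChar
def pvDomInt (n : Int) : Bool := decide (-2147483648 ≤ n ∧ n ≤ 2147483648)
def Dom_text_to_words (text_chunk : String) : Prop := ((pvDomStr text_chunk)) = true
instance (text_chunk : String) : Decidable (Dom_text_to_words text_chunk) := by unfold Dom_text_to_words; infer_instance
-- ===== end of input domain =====

-- B replaces A's translate/lower/split/Counter pipeline by a single character-level scan that assembles tokens by hand (alternative decomposition, same cost).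

-- ===== PORT A =====
-- string.punctuation
def pvPunct : List Char := "!\"#$%&'()*+,-./:;<=>?@[\\]^_`{|}~".toList

-- text_chunk.translate(TR): every punctuation char becomes a space (exact: the table maps each of string.punctuation to ' ')
def pvTranslate (s : String) : String :=
  String.ofList (s.toList.map (fun c => if pvPunct.contains c then ' ' else c))

def pvStopWords : List String :=
  ["a", "an", "and", "are", "as", "be", "by", "for", "if", "in",
   "is", "it", "of", "or", "py", "rst", "that", "the", "to", "with"]

def text_to_words (text_chunk : String) : List (String × Int) :=
  ((PySem.Str.split₀ (PySem.Str.lower (pvTranslate text_chunk))).foldl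
      (fun d word =>
        if PySem.Str.strIsalpha word && !((PySem.Set.ofList pvStopWords).contains word) then
          d.modify word 0 (· + 1)               -- counts[word] += 1
        else d)
      PySem.Dict.empty).items

-- ===== PORT B =====
-- one step of Source B's loop body; state = (counts, buf, alpha)
def pvScanStep (st : PySem.Dict String Int × List Char × Bool) (c : Char) :
    PySem.Dict String Int × List Char × Bool :=
  match st with
  | (d, buf, alpha) =>
    if PySem.Chars.isalnum c then
      (d, buf ++ [PySem.Chars.lowerChar c], alpha && PySem.Chars.isalpha c)
    else
      ((if !buf.isEmpty && alpha then
          (if (PySem.Set.ofList pvStopWords).contains (String.ofList buf) then d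
           else d.modify (String.ofList buf) 0 (· + 1))     -- counts[w] = counts.get(w, 0) + 1
        else d), [], true)

-- 'for c in text_chunk + " "': iteration over the chars of t ++ " " is the fold over t.toList ++ [' '] (exact)
def text_to_words_alt (text_chunk : String) : List (String × Int) :=
  ((text_chunk.toList ++ [' ']).foldl pvScanStep (PySem.Dict.empty, [], true)).1.items

-- ===== PRECONDITION & SPEC =====
def Spec_text_to_words (text_chunk : String) (out : List (String × Int)) : Prop := out = text_to_words_alt text_chunk
instance (text_chunk : String) (out : List (String × Int)) : Decidable (Spec_text_to_words text_chunk out) := by unfold Spec_text_to_words; infer_instance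

-- ===== CLAIM (what is proved, stated in full; the proofs are below) =====
def Claim_equal_text_to_words : Prop := ∀ (text_chunk : String), Dom_text_to_words text_chunk → Spec_text_to_words text_chunk (text_to_words text_chunk)

-- ===== LEMMAS AND PROOFS =====

-- the per-character effect of A's pipeline: translate punctuation to space, then lowercase
def pvF (c : Char) : Char := PySem.Chars.lowerChar (if pvPunct.contains c then ' ' else c)

-- the common word-processing step, on the char-list level
def pvStep (d : PySem.Dict String Int) (w : List Char) : PySem.Dict String Int :=
  if PySem.Chars.strIsalpha w && !((PySem.Set.ofList pvStopWords).contains (String.ofList w)) then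
    d.modify (String.ofList w) 0 (· + 1)
  else d

-- the (lowered) tokens of cs, given the lowered partial token buf
def pvTok : List Char → List Char → List (List Char)
  | [], buf => if buf.isEmpty then [] else [buf]
  | c :: rest, buf =>
      if PySem.Chars.isalnum c then pvTok rest (buf ++ [PySem.Chars.lowerChar c])
      else (if buf.isEmpty then [] else [buf]) ++ pvTok rest []

-- equation lemmas for the two step functions
theorem pvScanStep_alnum (d : PySem.Dict String Int) (buf : List Char) (alpha : Bool) (c : Char)
    (h : PySem.Chars.isalnum c = true) :
    pvScanStep (d, buf, alpha) c = (d, buf ++ [PySem.Chars.lowerChar c], alpha && PySem.Chars.isalpha c) := by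
  simp [pvScanStep, h]

theorem pvScanStep_other (d : PySem.Dict String Int) (buf : List Char) (alpha : Bool) (c : Char)
    (h : PySem.Chars.isalnum c = false) :
    pvScanStep (d, buf, alpha) c =
      ((if !buf.isEmpty && alpha then
          (if (PySem.Set.ofList pvStopWords).contains (String.ofList buf) then d
           else d.modify (String.ofList buf) 0 (· + 1))
        else d), [], true) := by
  simp [pvScanStep, h]

theorem pvTok_alnum (c : Char) (rest buf : List Char) (h : PySem.Chars.isalnum c = true) :
    pvTok (c :: rest) buf = pvTok rest (buf ++ [PySem.Chars.lowerChar c]) := by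
  simp [pvTok, h]

theorem pvTok_other (c : Char) (rest buf : List Char) (h : PySem.Chars.isalnum c = false) :
    pvTok (c :: rest) buf = (if buf.isEmpty then [] else [buf]) ++ pvTok rest [] := by
  simp [pvTok, h]

-- character classification facts, checked over the whole (finite) domain character range
set_option maxRecDepth 4096 in
theorem pv_char_facts : ∀ n ∈ List.range 127, pvDomChar (Char.ofNat n) = true →
    (PySem.Chars.isalnum (Char.ofNat n) = true →
       pvF (Char.ofNat n) = PySem.Chars.lowerChar (Char.ofNat n) ∧
       PySem.Chars.isspace (PySem.Chars.lowerChar (Char.ofNat n)) = false) ∧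
    (PySem.Chars.isalnum (Char.ofNat n) = false → PySem.Chars.isspace (pvF (Char.ofNat n)) = true) ∧
    (PySem.Chars.isalpha (PySem.Chars.lowerChar (Char.ofNat n)) = PySem.Chars.isalpha (Char.ofNat n)) := by
  decide

theorem pv_char_dom (c : Char) (hc : pvDomChar c = true) :
    (PySem.Chars.isalnum c = true →
       pvF c = PySem.Chars.lowerChar c ∧
       PySem.Chars.isspace (PySem.Chars.lowerChar c) = false) ∧
    (PySem.Chars.isalnum c = false → PySem.Chars.isspace (pvF c) = true) ∧
    (PySem.Chars.isalpha (PySem.Chars.lowerChar c) = PySem.Chars.isalpha c) := by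
  have hlt : c.toNat < 127 := by
    simp only [pvDomChar, Bool.or_eq_true, Bool.and_eq_true, decide_eq_true_eq, beq_iff_eq] at hc
    omega
  have h := pv_char_facts c.toNat (List.mem_range.mpr hlt) (by rw [Char.ofNat_toNat]; exact hc)
  rwa [Char.ofNat_toNat] at h

-- B's flush of the current buffer is exactly pvStep applied to the buffered token (if any)
theorem pv_flush (d : PySem.Dict String Int) (buf : List Char) :
    (if !buf.isEmpty && buf.all PySem.Chars.isalpha then
       (if (PySem.Set.ofList pvStopWords).contains (String.ofList buf) then d
        else d.modify (String.ofList buf) 0 (· + 1))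
     else d)
    = (if buf.isEmpty then [] else [buf]).foldl pvStep d := by
  cases hb : buf.isEmpty
  · rw [show (if false = true then ([] : List (List Char)) else [buf]) = [buf] from rfl,
        List.foldl_cons, List.foldl_nil]
    unfold pvStep
    simp only [PySem.Chars.strIsalpha, hb, Bool.not_false, Bool.true_and]
    cases hct : (PySem.Set.ofList pvStopWords).contains (String.ofList buf) <;>
      cases ha : buf.all PySem.Chars.isalpha <;> simp
  · simp

-- B's scan computes the pvStep-fold over the tokens
theorem pv_scan_eq (cs : List Char) (hD : ∀ c ∈ cs, pvDomChar c = true)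
    (d : PySem.Dict String Int) (buf : List Char) (alpha : Bool)
    (hinv : alpha = buf.all PySem.Chars.isalpha) :
    ((cs ++ [' ']).foldl pvScanStep (d, buf, alpha)).1 = (pvTok cs buf).foldl pvStep d := by
  induction cs generalizing d buf alpha with
  | nil =>
    subst hinv
    rw [List.nil_append, List.foldl_cons,
      pvScanStep_other _ _ _ _ (by decide), List.foldl_nil]
    exact pv_flush d buf
  | cons c rest ih =>
    have hc := pv_char_dom c (hD c (List.mem_cons_self ..))
    have hrest : ∀ x ∈ rest, pvDomChar x = true := fun x hx => hD x (List.mem_cons_of_mem _ hx)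
    rw [List.cons_append, List.foldl_cons]
    cases han : PySem.Chars.isalnum c
    · subst hinv
      rw [pvScanStep_other _ _ _ _ han, pvTok_other _ _ _ han,
        ih hrest _ [] true rfl, pv_flush d buf, ← List.foldl_append]
    · rw [pvScanStep_alnum _ _ _ _ han, pvTok_alnum _ _ _ han]
      exact ih hrest _ _ _ (by simp [hinv, hc.2.2])

-- split₀ of the translated+lowered chars produces exactly the tokens
theorem pv_split_eq (cs : List Char) (hD : ∀ c ∈ cs, pvDomChar c = true)
    (buf : List Char) (acc : List (List Char)) :
    PySem.Chars.split₀.go (cs.map pvF) buf.reverse acc = acc.reverse ++ pvTok cs buf := by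
  induction cs generalizing buf acc with
  | nil =>
    simp only [List.map_nil, PySem.Chars.split₀.go, pvTok, List.isEmpty_reverse,
      List.reverse_reverse]
    by_cases hb : buf.isEmpty <;> simp [hb]
  | cons c rest ih =>
    have hc := pv_char_dom c (hD c (List.mem_cons_self ..))
    have hrest : ∀ x ∈ rest, pvDomChar x = true := fun x hx => hD x (List.mem_cons_of_mem _ hx)
    simp only [List.map_cons, PySem.Chars.split₀.go]
    cases han : PySem.Chars.isalnum c
    · have hsp := hc.2.1 han
      rw [if_pos hsp, pvTok_other _ _ _ han]
      by_cases hb : buf = []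
      · subst hb
        rw [if_pos (by simp)]
        have := ih hrest [] acc
        simpa using this
      · rw [if_neg (by simp [hb]), List.reverse_reverse]
        have := ih hrest [] (buf :: acc)
        simp only [List.reverse_nil, List.reverse_cons] at this
        simp [this, hb]
    · obtain ⟨hf, hsp⟩ := hc.1 han
      rw [hf, if_neg (by simp [hsp]), pvTok_alnum _ _ _ han,
        show PySem.Chars.lowerChar c :: buf.reverse = (buf ++ [PySem.Chars.lowerChar c]).reverse by simp,
        ih hrest _ acc]

-- ===== VERDICT (by name: the statement is the Claim_ definition above) =====
set_option maxHeartbeats 1000000 in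
theorem text_to_words_spec : Claim_equal_text_to_words := by
  intro t ht
  unfold Spec_text_to_words text_to_words text_to_words_alt
  have hD : ∀ c ∈ t.toList, pvDomChar c = true := by
    simpa [Dom_text_to_words, pvDomStr, List.all_eq_true] using ht
  have htl : (PySem.Str.lower (pvTranslate t)).toList = t.toList.map pvF := by
    simp [pvTranslate, PySem.Chars.lower, List.map_map, pvF, Function.comp]
  have hsplit : PySem.Str.split₀ (PySem.Str.lower (pvTranslate t))
      = (PySem.Chars.split₀ (t.toList.map pvF)).map String.ofList := by
    rw [PySem.Str.split₀, htl]
  rw [hsplit, List.foldl_map]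
  have hfold : ((PySem.Chars.split₀ (t.toList.map pvF)).foldl
      (fun d w =>
        if PySem.Str.strIsalpha (String.ofList w) && !((PySem.Set.ofList pvStopWords).contains (String.ofList w)) then
          PySem.Dict.modify d (String.ofList w) 0 (· + 1)
        else d) PySem.Dict.empty)
      = ((PySem.Chars.split₀ (t.toList.map pvF)).foldl pvStep PySem.Dict.empty) := by
    apply PySem.List.foldl_congr_mem
    intro d' w _
    simp [pvStep, PySem.Str.strIsalpha]
  rw [hfold]
  have hgo : PySem.Chars.split₀ (t.toList.map pvF) = pvTok t.toList [] := by
    have := pv_split_eq t.toList hD [] []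
    simpa [PySem.Chars.split₀] using this
  rw [hgo, ← pv_scan_eq t.toList hD PySem.Dict.empty [] true rfl]
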